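-- pv_equiv track=rewrite | github.com/dougy147/rosalind | 20-mprt/mprt.py | find_Nglycosylation
-- ===== SOURCE A (Python) =====
-- def is_Nglycosylation(sub):
--     a,b,c,d = sub
--     if a == "N" and b != "P" and (c == "S" or c == "T") and d != "P":
--         return True
--     return False
--
-- def find_Nglycosylation(protein_str):
--     pattern = "N[^P](S|T)[^P]"
--     indexes = []
--     index = 1
--     while protein_str != "":
--         if len(protein_str) < 4: break
--         sub = protein_str[:4]
--         if is_Nglycosylation(sub):
--             indexes.append(index)
--         protein_str=protein_str[1:]
--         index+=1
--     if indexes == []: return ""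
--     return " ".join(map(str,indexes))
-- ===== SOURCE B (Python) =====
-- def find_Nglycosylation(protein_str):
--     s = protein_str
--     hits = [i + 1
--             for i, (a, b, c, d) in enumerate(zip(s, s[1:], s[2:], s[3:]))
--             if a == 'N' and b != 'P' and (c == 'S' or c == 'T') and d != 'P']
--     return " ".join(map(str, hits))
-- ===== Notes on version B (the rewrite author's own statement) =====
-- stated objective: faster
-- what changed: Replaced the while-loop that repeatedly reslices the string and tests a 4-char prefix with a single comprehension over a 4-way zip of shifted views, collecting 1-based hit indices and joining them (join of [] already gives '').
import Mathlib
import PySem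

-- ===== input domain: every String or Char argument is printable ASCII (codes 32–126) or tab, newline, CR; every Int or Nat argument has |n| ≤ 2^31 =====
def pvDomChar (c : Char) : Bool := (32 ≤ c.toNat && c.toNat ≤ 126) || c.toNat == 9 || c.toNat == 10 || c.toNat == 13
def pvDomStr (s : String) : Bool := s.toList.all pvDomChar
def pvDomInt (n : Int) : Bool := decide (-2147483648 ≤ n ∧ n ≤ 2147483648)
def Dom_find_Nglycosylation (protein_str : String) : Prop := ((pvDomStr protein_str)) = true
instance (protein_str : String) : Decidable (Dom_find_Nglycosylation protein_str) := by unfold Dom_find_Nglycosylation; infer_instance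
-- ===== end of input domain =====

-- B replaces A's while-loop of repeated string reslicing with one comprehension over a
-- 4-way zip of shifted views, avoiding the per-step string copy (objective: faster); return values proved equal on all inputs.

-- ===== PORT A =====
-- a,b,c,d = sub raises for len(sub) ≠ 4, but A only calls it with length-4 substrings;
-- the catch-all branch is unreachable on A's calls.
def pvIsNgly (sub : List Char) : Bool :=
  match sub with
  | [a, b, c, d] => a == 'N' && b != 'P' && (c == 'S' || c == 'T') && d != 'P'
  | _ => false

def pvLoopA : List Char → Int → List Int → List Int
  | [], _, indexes => indexes
  | a :: rest, index, indexes =>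
    if (a :: rest).length < 4 then indexes
    else pvLoopA rest (index + 1)
      (if pvIsNgly ((a :: rest).take 4) then indexes ++ [index] else indexes)

def find_Nglycosylation (protein_str : String) : String :=
  let indexes := pvLoopA protein_str.toList 1 []
  if indexes = [] then "" else PySem.Str.join " " (indexes.map PySem.Int.toStr)

-- ===== PORT B =====
-- 4-ary zip (Python's builtin zip over four iterables, ported by hand)
def pvZip4 : List Char → List Char → List Char → List Char → List (Char × Char × Char × Char)
  | a :: as, b :: bs, c :: cs, d :: ds => (a, b, c, d) :: pvZip4 as bs cs ds
  | _, _, _, _ => []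

def pvHit (q : Char × Char × Char × Char) : Bool :=
  q.1 == 'N' && q.2.1 != 'P' && (q.2.2.1 == 'S' || q.2.2.1 == 'T') && q.2.2.2 != 'P'

def find_Nglycosylation_alt (protein_str : String) : String :=
  let l := protein_str.toList
  let hits := (PySem.List.enumerate (pvZip4 l (l.drop 1) (l.drop 2) (l.drop 3))).filterMap
      (fun p => if pvHit p.2 then some (p.1 + 1) else none)
  PySem.Str.join " " (hits.map PySem.Int.toStr)

-- ===== PRECONDITION & SPEC =====
def Spec_find_Nglycosylation (protein_str : String) (out : String) : Prop := out = find_Nglycosylation_alt protein_str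
instance (protein_str : String) (out : String) : Decidable (Spec_find_Nglycosylation protein_str out) := by unfold Spec_find_Nglycosylation; infer_instance

-- ===== CLAIM (what is proved, stated in full; the proofs are below) =====
def Claim_equal_find_Nglycosylation : Prop := ∀ (protein_str : String), Dom_find_Nglycosylation protein_str → Spec_find_Nglycosylation protein_str (find_Nglycosylation protein_str)

-- ===== LEMMAS AND PROOFS =====

theorem pvLoopA_acc (l : List Char) : ∀ (i : Int) (acc : List Int),
    pvLoopA l i acc = acc ++ pvLoopA l i [] := by
  induction l with
  | nil => intro i acc; simp [pvLoopA]
  | cons a rest ih =>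
    intro i acc
    simp only [pvLoopA]
    by_cases h : (a :: rest).length < 4
    · simp only [if_pos h]; simp
    · simp only [if_neg h]
      by_cases hg : pvIsNgly ((a :: rest).take 4) = true
      · simp only [if_pos hg]
        rw [ih (i + 1) (acc ++ [i]), ih (i + 1) ([] ++ [i])]
        simp
      · simp only [if_neg hg]
        exact ih (i + 1) acc

theorem pvLoopA_eq_filterMap (l : List Char) : ∀ (i : Int),
    pvLoopA l i [] =
      (PySem.List.enumerate (pvZip4 l (l.drop 1) (l.drop 2) (l.drop 3)) i).filterMap
        (fun p => if pvHit p.2 then some p.1 else none) := by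
  induction l with
  | nil => intro i; simp [pvLoopA, pvZip4, PySem.List.enumerate_nil]
  | cons a rest ih =>
    intro i
    match rest with
    | [] => simp [pvLoopA, pvZip4, PySem.List.enumerate_nil]
    | [b] => simp [pvLoopA, pvZip4, PySem.List.enumerate_nil]
    | [b, c] => simp [pvLoopA, pvZip4, PySem.List.enumerate_nil]
    | b :: c :: d :: rest' =>
      have hlen : ¬ (a :: b :: c :: d :: rest').length < 4 := by simp
      have ht : (a :: b :: c :: d :: rest').take 4 = [a, b, c, d] := by simp
      have hz : pvZip4 (a :: b :: c :: d :: rest')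
            ((a :: b :: c :: d :: rest').drop 1)
            ((a :: b :: c :: d :: rest').drop 2)
            ((a :: b :: c :: d :: rest').drop 3)
          = (a, b, c, d) :: pvZip4 (b :: c :: d :: rest')
              ((b :: c :: d :: rest').drop 1)
              ((b :: c :: d :: rest').drop 2)
              ((b :: c :: d :: rest').drop 3) := by
        simp [pvZip4]
      have hhit : pvHit (a, b, c, d) = pvIsNgly [a, b, c, d] := by
        simp [pvHit, pvIsNgly]
      rw [hz, PySem.List.enumerate_cons, List.filterMap_cons]
      by_cases hg : pvIsNgly [a, b, c, d] = true
      · rw [pvLoopA, if_neg hlen, ht, if_pos hg,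
          pvLoopA_acc (b :: c :: d :: rest') (i + 1) ([] ++ [i]), ih (i + 1)]
        simp [hhit, hg]
      · rw [pvLoopA, if_neg hlen, ht, if_neg hg, ih (i + 1)]
        simp [hhit, hg]

theorem filterMap_shift (q : List (Char × Char × Char × Char)) : ∀ (s : Int),
    (PySem.List.enumerate q s).filterMap
        (fun p => if pvHit p.2 then some (p.1 + 1) else none)
      = (PySem.List.enumerate q (s + 1)).filterMap
        (fun p => if pvHit p.2 then some p.1 else none) := by
  induction q with
  | nil => intro s; simp [PySem.List.enumerate_nil]
  | cons x xs ih =>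
    intro s
    rw [PySem.List.enumerate_cons, PySem.List.enumerate_cons,
      List.filterMap_cons, List.filterMap_cons]
    by_cases h : pvHit x = true
    · simp only [h]
      rw [ih (s + 1)]
    · simp [h]
      exact ih (s + 1)

theorem join_empty : PySem.Str.join " " ([] : List String) = "" := by decide

-- ===== VERDICT (by name: the statement is the Claim_ definition above) =====
theorem find_Nglycosylation_spec : Claim_equal_find_Nglycosylation := by
  intro s _
  unfold Spec_find_Nglycosylation find_Nglycosylation find_Nglycosylation_alt
  have h01 := filterMap_shift
    (pvZip4 s.toList (s.toList.drop 1) (s.toList.drop 2) (s.toList.drop 3)) 0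
  rw [show ((0 : Int) + 1) = 1 by decide] at h01
  rw [pvLoopA_eq_filterMap s.toList 1, ← h01]
  show (if (PySem.List.enumerate
        (pvZip4 s.toList (s.toList.drop 1) (s.toList.drop 2) (s.toList.drop 3))).filterMap
        (fun p => if pvHit p.2 then some (p.1 + 1) else none) = [] then ""
      else PySem.Str.join " " (((PySem.List.enumerate
        (pvZip4 s.toList (s.toList.drop 1) (s.toList.drop 2) (s.toList.drop 3))).filterMap
        (fun p => if pvHit p.2 then some (p.1 + 1) else none)).map PySem.Int.toStr))
    = PySem.Str.join " " (((PySem.List.enumerate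
        (pvZip4 s.toList (s.toList.drop 1) (s.toList.drop 2) (s.toList.drop 3))).filterMap
        (fun p => if pvHit p.2 then some (p.1 + 1) else none)).map PySem.Int.toStr)
  by_cases h : (PySem.List.enumerate
      (pvZip4 s.toList (s.toList.drop 1) (s.toList.drop 2) (s.toList.drop 3))).filterMap
      (fun p => if pvHit p.2 then some (p.1 + 1) else none) = []
  · rw [if_pos h, h]
    exact join_empty.symm
  · rw [if_neg h]
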